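-- pv_equiv track=rewrite | github.com/hugcis/cyk-parser | parse.py | reverse_nested_dict
-- ===== SOURCE A (Python) =====
-- def reverse_nested_dict(dic):
--     dict_rev = {}
--     for i in dic:
--         for j in dic[i]:
--             if j not in dict_rev:
--                 dict_rev[j] = {}
--             dict_rev[j][i] = dic[i][j]
--     return dict_rev
-- ===== SOURCE B (Python) =====
-- def reverse_nested_dict(dic):
--     inner = dict.fromkeys(k for i in dic for k in dic[i])
--     return {j: {i: dic[i][j] for i in dic if j in dic[i]} for j in inner}
-- ===== Notes on version B (the rewrite author's own statement) =====
-- stated objective: simpler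
-- what changed: B first collects the distinct inner keys in first-encounter order with dict.fromkeys and then builds the whole result as one nested dict comprehension that rescans the outer dict per inner key, instead of A's incremental mutation of a dict-of-dicts in a single pass.
import Mathlib
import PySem

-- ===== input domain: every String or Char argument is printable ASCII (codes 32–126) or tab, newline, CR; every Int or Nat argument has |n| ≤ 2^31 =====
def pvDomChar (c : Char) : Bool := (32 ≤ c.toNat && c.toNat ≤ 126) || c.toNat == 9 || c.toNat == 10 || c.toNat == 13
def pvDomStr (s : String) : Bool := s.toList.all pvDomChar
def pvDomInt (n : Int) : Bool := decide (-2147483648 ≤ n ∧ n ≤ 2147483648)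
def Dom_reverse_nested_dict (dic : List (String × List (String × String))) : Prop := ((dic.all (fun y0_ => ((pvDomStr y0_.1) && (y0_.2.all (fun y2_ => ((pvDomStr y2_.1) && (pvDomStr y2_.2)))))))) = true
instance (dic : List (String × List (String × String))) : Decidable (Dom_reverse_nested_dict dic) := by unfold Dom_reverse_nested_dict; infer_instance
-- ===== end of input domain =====

-- B reverses the nested dict with an up-front index of the distinct inner keys and one
-- nested comprehension, instead of A's incremental single-pass dict-of-dict mutation
-- (objective: simpler/alternative; same result, no speed claim).

-- ===== PORT A =====
-- body of A's double loop: for j in dic[i]: if j not in dict_rev: dict_rev[j] = {}; dict_rev[j][i] = dic[i][j]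
-- ('if absent insert {} then set [i]' is exactly Dict.modify j {} (·.insert i v): same items, same order)
def pvStepA (acc : PySem.Dict String (PySem.Dict String String)) (p : String × List (String × String)) :
    PySem.Dict String (PySem.Dict String String) :=
  p.2.foldl (fun acc q => acc.modify q.1 PySem.Dict.empty (fun inn => inn.insert p.1 q.2)) acc

def reverse_nested_dict (dic : List (String × List (String × String))) : List (String × List (String × String)) :=
  ((dic.foldl pvStepA PySem.Dict.empty).items).map (fun p => (p.1, p.2.items))

-- ===== PORT B =====
-- {i: dic[i][j] for i in dic if j in dic[i]} for a fixed inner key j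
def pvColumn (dic : List (String × List (String × String))) (j : String) : List (String × String) :=
  dic.filterMap (fun p => ((PySem.Dict.mk p.2).get? j).map (fun v => (p.1, v)))

def reverse_nested_dict_alt (dic : List (String × List (String × String))) : List (String × List (String × String)) :=
  -- inner = dict.fromkeys(k for i in dic for k in dic[i])
  (PySem.List.dedup (dic.flatMap (fun p => p.2.map Prod.fst))).map (fun j => (j, pvColumn dic j))

-- ===== PRECONDITION & SPEC =====
-- Pre_ states the dict invariant of the Python parameter (a dict of dicts has distinct keys at
-- both levels); association lists with duplicate keys do not represent any Python input of A.
def Pre_reverse_nested_dict (dic : List (String × List (String × String))) : Prop :=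
  (dic.map Prod.fst).Nodup ∧ ∀ p ∈ dic, (p.2.map Prod.fst).Nodup

instance (dic : List (String × List (String × String))) : Decidable (Pre_reverse_nested_dict dic) := by
  unfold Pre_reverse_nested_dict; infer_instance

def pvWitness_reverse_nested_dict : (List (String × List (String × String))) :=
  [("a", [("x", "1"), ("y", "2")]), ("b", [("y", "3"), ("z", "4")])]

def Spec_reverse_nested_dict (dic : List (String × List (String × String))) (out : List (String × List (String × String))) : Prop := out = reverse_nested_dict_alt dic
instance (dic : List (String × List (String × String))) (out : List (String × List (String × String))) : Decidable (Spec_reverse_nested_dict dic out) := by unfold Spec_reverse_nested_dict; infer_instance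

-- ===== CLAIM (what is proved, stated in full; the proofs are below) =====
def Claim_equal_reverse_nested_dict : Prop := ∀ (dic : List (String × List (String × String))), Dom_reverse_nested_dict dic → Pre_reverse_nested_dict dic → Spec_reverse_nested_dict dic (reverse_nested_dict dic)

-- ===== LEMMAS AND PROOFS =====

-- the inner fold leaves slot j alone when j is not among the processed keys
theorem pv_fold_getD_untouched (l : List (String × String)) (i j : String)
    (d : PySem.Dict String (PySem.Dict String String)) (h : j ∉ l.map Prod.fst) :
    (l.foldl (fun acc q => acc.modify q.1 PySem.Dict.empty (fun inn => inn.insert i q.2)) d).getD j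
      PySem.Dict.empty = d.getD j PySem.Dict.empty := by
  induction l generalizing d with
  | nil => rfl
  | cons q rest ih =>
    simp only [List.map_cons, List.mem_cons, not_or] at h
    simp only [List.foldl_cons]
    rw [ih _ h.2, PySem.Dict.getD_modify_of_ne _ _ _ h.1]

-- what one outer entry (i, l) does to slot j: append (i, l[j]) iff j ∈ l
theorem pv_fold_getD (l : List (String × String)) (i j : String)
    (d : PySem.Dict String (PySem.Dict String String)) (hnd : (l.map Prod.fst).Nodup) :
    (l.foldl (fun acc q => acc.modify q.1 PySem.Dict.empty (fun inn => inn.insert i q.2)) d).getD j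
      PySem.Dict.empty =
    ((PySem.Dict.mk l).get? j).elim (d.getD j PySem.Dict.empty)
      (fun v => (d.getD j PySem.Dict.empty).insert i v) := by
  induction l generalizing d with
  | nil => rfl
  | cons q rest ih =>
    obtain ⟨q1, q2⟩ := q
    simp only [List.map_cons, List.nodup_cons] at hnd
    simp only [List.foldl_cons, PySem.Dict.get?_mk_cons]
    by_cases hj : q1 = j
    · subst hj
      rw [pv_fold_getD_untouched _ _ _ _ hnd.1, PySem.Dict.getD_modify_self]
      simp
    · rw [ih _ hnd.2]
      have : (d.modify q1 PySem.Dict.empty (fun inn => inn.insert i q2)).getD j PySem.Dict.empty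
          = d.getD j PySem.Dict.empty := PySem.Dict.getD_modify_of_ne _ _ _ (fun h => hj h.symm)
      simp [beq_iff_eq, hj, this]

-- keys of the accumulated dict after one outer entry
theorem pv_stepA_keys (acc : PySem.Dict String (PySem.Dict String String))
    (p : String × List (String × String)) :
    (pvStepA acc p).keys = PySem.Set.update acc.keys (p.2.map Prod.fst) :=
  PySem.Dict.keys_foldl_modify_key p.2 Prod.fst PySem.Dict.empty
    (fun _ q inn => inn.insert p.1 q.2) acc

-- every key appearing in column j of dic is an outer key of dic
theorem pv_column_keys_sub (dic : List (String × List (String × String))) (j x : String)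
    (hx : x ∈ (pvColumn dic j).map Prod.fst) : x ∈ dic.map Prod.fst := by
  simp only [pvColumn, List.map_filterMap, List.mem_filterMap, Option.map_map, Option.map_eq_some_iff] at hx
  obtain ⟨p, hp, v, _, hv⟩ := hx
  cases hv
  exact List.mem_map_of_mem hp

-- main invariant of A's outer loop, by induction from the right
theorem pv_main (dic : List (String × List (String × String)))
    (h : Pre_reverse_nested_dict dic) :
    (dic.foldl pvStepA PySem.Dict.empty).keys
        = PySem.Set.ofList (dic.flatMap (fun p => p.2.map Prod.fst))
    ∧ ∀ j, ((dic.foldl pvStepA PySem.Dict.empty).getD j PySem.Dict.empty).items = pvColumn dic j := by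
  induction dic using List.reverseRecOn with
  | nil => exact ⟨rfl, fun j => rfl⟩
  | append_singleton xs p ih =>
    obtain ⟨hout, hin⟩ := h
    have hpre : Pre_reverse_nested_dict xs :=
      ⟨by simpa using (List.Nodup.sublist (by simp) hout :
          ((xs.map Prod.fst).Nodup)),
       fun q hq => hin q (List.mem_append_left _ hq)⟩
    have hfresh : p.1 ∉ xs.map Prod.fst := by
      have h2 := hout
      rw [List.map_append, List.nodup_append] at h2
      intro hm
      exact h2.2.2 p.1 hm p.1 (by simp) rfl
    obtain ⟨ihk, ihg⟩ := ih hpre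
    rw [List.foldl_append]
    simp only [List.foldl_cons, List.foldl_nil]
    constructor
    · rw [pv_stepA_keys, ihk, List.flatMap_append]
      simp [PySem.Set.ofList_append]
    · intro j
      have hnodup_in : (p.2.map Prod.fst).Nodup := hin p (by simp)
      rw [show pvStepA (xs.foldl pvStepA PySem.Dict.empty) p =
            p.2.foldl (fun acc q => acc.modify q.1 PySem.Dict.empty
              (fun inn => inn.insert p.1 q.2)) (xs.foldl pvStepA PySem.Dict.empty) from rfl]
      rw [pv_fold_getD _ _ _ _ hnodup_in]
      have hcol : pvColumn (xs ++ [p]) j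
          = pvColumn xs j ++ ((PySem.Dict.mk p.2).get? j).elim [] (fun v => [(p.1, v)]) := by
        simp only [pvColumn, List.filterMap_append, List.filterMap_cons, List.filterMap_nil]
        cases (PySem.Dict.mk p.2).get? j <;> simp
      cases hget : (PySem.Dict.mk p.2).get? j with
      | none => simp [hcol, hget, ihg j]
      | some v =>
        have hnc : ((xs.foldl pvStepA PySem.Dict.empty).getD j PySem.Dict.empty).contains p.1 = false := by
          rw [PySem.Dict.contains_eq_decide_mem_keys]
          simp only [decide_eq_false_iff_not, PySem.Dict.keys]
          intro hmem
          have : p.1 ∈ ((xs.foldl pvStepA PySem.Dict.empty).getD j PySem.Dict.empty).items.map Prod.fst := hmem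
          rw [ihg j] at this
          exact hfresh (pv_column_keys_sub xs j p.1 this)
        simp only [Option.elim, hcol, hget]
        rw [PySem.Dict.items_insert_of_not_contains _ _ hnc, ihg j]

-- items of a dict with nodup keys, rebuilt from its keys via getD
theorem pv_assemble (d : PySem.Dict String (PySem.Dict String String)) (hnd : d.keys.Nodup) :
    d.items.map (fun p => (p.1, p.2.items)) = d.keys.map (fun j => (j, (d.getD j PySem.Dict.empty).items)) := by
  rw [show d.keys = d.items.map Prod.fst from rfl, List.map_map]
  apply List.map_congr_left
  intro p hp
  have : d.getD p.1 PySem.Dict.empty = p.2 := PySem.Dict.getD_of_mem_items d hp hnd _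
  simp [this]

-- ===== VERDICT (by name: the statement is the Claim_ definition above) =====
theorem reverse_nested_dict_spec : Claim_equal_reverse_nested_dict := by
  intro dic _ hpre
  unfold Spec_reverse_nested_dict reverse_nested_dict reverse_nested_dict_alt
  obtain ⟨hk, hg⟩ := pv_main dic hpre
  have hnd : (dic.foldl pvStepA PySem.Dict.empty).keys.Nodup := by
    rw [hk]; exact PySem.Set.nodup_ofList _
  rw [pv_assemble _ hnd, hk, PySem.List.dedup_eq_ofList]
  exact List.map_congr_left (fun j _ => by rw [hg j])
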